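-- pv_equiv track=rewrite | github.com/baldmer/cqa_kv-mem_oovkg | oov_approaches/oov_matching_label.py | search_in
-- ===== SOURCE A (Python) =====
-- def search_in(word_embeds, oov_entities):
--     """search oov entities with word embeddings"""
--
--     entity_label_found = {}
--
--     for ent, label in oov_entities.items():
--         label_cap = label.capitalize()
--         if label in word_embeds:
--             # single words
--             entity_label_found[ent] = label
--         elif label_cap in word_embeds:
--             # first character in capital
--             entity_label_found[ent] = label_cap
--         else:
--             # sentences (words_separated by _)
--             sentence = '_'.join(label.split(' '))
--             if sentence in word_embeds:
--                 entity_label_found[ent] = sentence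
--
--     return entity_label_found
-- ===== SOURCE B (Python) =====
-- def search_in(word_embeds, oov_entities):
--     """search oov entities with word embeddings"""
--     embeds = set(word_embeds)
--     transforms = (lambda l: l,
--                   lambda l: l.capitalize(),
--                   lambda l: '_'.join(l.split(' ')))
--     found = {}
--     remaining = list(oov_entities.items())
--     # staged passes: each pass matches one form over the still-unmatched items,
--     # so an item matched in an earlier pass keeps its higher-priority form
--     for f in transforms:
--         still = []
--         for ent, label in remaining:
--             form = f(label)
--             if form in embeds:
--                 found[ent] = form
--             else:
--                 still.append((ent, label))
--         remaining = still
--     # reassemble in the original key order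
--     return {ent: found[ent] for ent in oov_entities if ent in found}
-- ===== Notes on version B (the rewrite author's own statement) =====
-- stated objective: alternative
-- what changed: B replaces A's per-item three-way if/elif/else chain by three staged passes over the still-unmatched items (one pass per candidate form, matched items dropping out between passes), then reassembles the result in the original key order.
import Mathlib
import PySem

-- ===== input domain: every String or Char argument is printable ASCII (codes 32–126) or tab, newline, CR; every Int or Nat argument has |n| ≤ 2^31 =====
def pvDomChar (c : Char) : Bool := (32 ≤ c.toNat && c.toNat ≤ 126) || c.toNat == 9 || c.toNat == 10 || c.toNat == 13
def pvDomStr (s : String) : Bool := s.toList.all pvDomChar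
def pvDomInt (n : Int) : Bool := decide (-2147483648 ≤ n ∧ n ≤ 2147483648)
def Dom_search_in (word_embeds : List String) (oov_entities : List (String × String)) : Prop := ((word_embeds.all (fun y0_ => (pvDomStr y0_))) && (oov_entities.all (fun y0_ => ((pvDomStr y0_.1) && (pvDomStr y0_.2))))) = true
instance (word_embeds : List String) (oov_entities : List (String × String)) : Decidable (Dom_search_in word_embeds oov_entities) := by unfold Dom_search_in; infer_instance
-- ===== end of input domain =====

-- B replaces A's per-item if/elif/else chain by three staged passes over the still-unmatched
-- items (one pass per candidate form), reassembling in original key order (objective: alternative).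

-- ===== PORT A =====
-- s.capitalize(): first character uppercased, the rest lowercased; hand-ported
-- (no PySem primitive); exact on the ASCII domain, where Python's title-case of
-- the first character coincides with upper-case.
def pyCapitalize (s : String) : String :=
  match s.toList with
  | [] => ""
  | c :: rest => String.ofList (PySem.Chars.upperChar c :: PySem.Chars.lower rest)

def search_in (word_embeds : List String) (oov_entities : List (String × String)) : List (String × String) :=
  (oov_entities.foldl (fun entity_label_found p =>
      let label := p.2
      let label_cap := pyCapitalize label
      if word_embeds.contains label then
        entity_label_found.insert p.1 label
      else if word_embeds.contains label_cap then
        entity_label_found.insert p.1 label_cap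
      else
        let sentence := PySem.Str.join "_" ((PySem.Str.split? label " ").getD [])
        if word_embeds.contains sentence then
          entity_label_found.insert p.1 sentence
        else
          entity_label_found)
    PySem.Dict.empty).items

-- ===== PORT B =====
-- B's tuple of transforms, in priority order.
def pvTransforms : List (String → String) :=
  [fun l => l,
   fun l => pyCapitalize l,
   fun l => PySem.Str.join "_" ((PySem.Str.split? l " ").getD [])]

-- one staged pass: match one form over the still-unmatched items, keep the rest
def pvPassB (embeds : List String)
    (st : PySem.Dict String String × List (String × String)) (f : String → String) :
    PySem.Dict String String × List (String × String) :=
  st.2.foldl (fun acc p =>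
    let form := f p.2
    if embeds.contains form then (acc.1.insert p.1 form, acc.2)
    else (acc.1, acc.2 ++ [p])) (st.1, [])

def search_in_alt (word_embeds : List String) (oov_entities : List (String × String)) : List (String × String) :=
  let embeds := PySem.Set.ofList word_embeds
  let st := pvTransforms.foldl (pvPassB embeds) (PySem.Dict.empty, oov_entities)
  -- {ent: found[ent] for ent in oov_entities if ent in found} ('ent in found' + found[ent] = get?)
  (oov_entities.foldl (fun d p =>
      match st.1.get? p.1 with
      | some v => d.insert p.1 v
      | none => d) PySem.Dict.empty).items

-- ===== PRECONDITION & SPEC =====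
-- Pre_ excludes association lists whose oov_entities keys are not distinct: such lists do not
-- represent any Python dict (the dict argument collapses duplicate keys), so A's value there is
-- an artefact of the encoding and either program's behaviour is as defensible as the other's.
def Pre_search_in (word_embeds : List String) (oov_entities : List (String × String)) : Prop :=
  (oov_entities.map Prod.fst).Nodup

instance (word_embeds : List String) (oov_entities : List (String × String)) : Decidable (Pre_search_in word_embeds oov_entities) := by unfold Pre_search_in; infer_instance

def pvWitness_search_in : List String × (List (String × String)) :=
  (["Hello", "a_b"], [("e1", "hello"), ("e2", "a b"), ("e3", "zz")])

def Spec_search_in (word_embeds : List String) (oov_entities : List (String × String)) (out : List (String × String)) : Prop := out = search_in_alt word_embeds oov_entities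
instance (word_embeds : List String) (oov_entities : List (String × String)) (out : List (String × String)) : Decidable (Spec_search_in word_embeds oov_entities out) := by unfold Spec_search_in; infer_instance

-- ===== CLAIM (what is proved, stated in full; the proofs are below) =====
def Claim_equal_search_in : Prop := ∀ (word_embeds : List String) (oov_entities : List (String × String)), Dom_search_in word_embeds oov_entities → Pre_search_in word_embeds oov_entities → Spec_search_in word_embeds oov_entities (search_in word_embeds oov_entities)

-- ===== LEMMAS AND PROOFS =====

-- the reference form: per item, the first candidate found in word_embeds
def pvCandidates (label : String) : List String :=
  [label, pyCapitalize label, PySem.Str.join "_" ((PySem.Str.split? label " ").getD [])]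

def pvRef (word_embeds : List String) (oov_entities : List (String × String)) : List (String × String) :=
  oov_entities.filterMap (fun p =>
    ((pvCandidates p.2).find? (fun c => word_embeds.contains c)).map (fun c => (p.1, c)))

-- GENERIC: a conditional-insert fold over fresh distinct keys appends its matches.
theorem pvFold_items (g : (String × String) → Option String)
    (l : List (String × String)) (d : PySem.Dict String String)
    (hfresh : ∀ q ∈ l, d.contains q.1 = false)
    (hnd : (l.map Prod.fst).Nodup) :
    (l.foldl (fun d p => match g p with
        | some v => d.insert p.1 v
        | none => d) d).items =
      d.items ++ l.filterMap (fun p => (g p).map (fun v => (p.1, v))) := by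
  induction l generalizing d with
  | nil => simp
  | cons p l ih =>
    simp only [List.map_cons, List.nodup_cons, List.mem_map] at hnd
    have hdp : d.contains p.1 = false := hfresh p (List.mem_cons_self ..)
    have hfresh' : ∀ q ∈ l, q.1 ≠ p.1 := fun q hq hqe => hnd.1 ⟨q, hq, hqe⟩
    simp only [List.foldl_cons, List.filterMap_cons]
    cases hg : g p with
    | none =>
      simp only [Option.map_none]
      rw [ih d (fun q hq => hfresh q (List.mem_cons_of_mem _ hq)) hnd.2]
    | some c =>
      simp only [Option.map_some]
      rw [ih (d.insert p.1 c) ?_ hnd.2]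
      · rw [PySem.Dict.items_insert_of_not_contains d _ hdp]
        simp
      · intro q hq
        rw [PySem.Dict.contains_insert]
        simp only [Bool.or_eq_false_iff, beq_eq_false_iff_ne]
        exact ⟨hfresh' q hq, hfresh q (List.mem_cons_of_mem _ hq)⟩

-- ---- A = pvRef ----

def pvStepA (word_embeds : List String) (d : PySem.Dict String String) (p : String × String) : PySem.Dict String String :=
  let label := p.2
  let label_cap := pyCapitalize label
  if word_embeds.contains label then
    d.insert p.1 label
  else if word_embeds.contains label_cap then
    d.insert p.1 label_cap
  else
    let sentence := PySem.Str.join "_" ((PySem.Str.split? label " ").getD [])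
    if word_embeds.contains sentence then
      d.insert p.1 sentence
    else
      d

theorem search_in_eq_fold (word_embeds : List String) (oov_entities : List (String × String)) :
    search_in word_embeds oov_entities =
      (oov_entities.foldl (pvStepA word_embeds) PySem.Dict.empty).items := rfl

-- A's chain on one pair picks exactly the first matching candidate.
theorem pvStepA_eq (word_embeds : List String) (d : PySem.Dict String String) (p : String × String) :
    pvStepA word_embeds d p =
      match ((pvCandidates p.2).find? (fun c => word_embeds.contains c)) with
      | some c => d.insert p.1 c
      | none => d := by
  simp only [pvStepA, pvCandidates]
  by_cases h1 : p.2 ∈ word_embeds <;>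
    by_cases h2 : pyCapitalize p.2 ∈ word_embeds <;>
      by_cases h3 : PySem.Str.join "_" ((PySem.Str.split? p.2 " ").getD []) ∈ word_embeds <;>
        simp [List.find?, List.contains_eq_mem, h1, h2, h3]

theorem pvA_eq_ref (word_embeds : List String) (oov_entities : List (String × String))
    (hnd : (oov_entities.map Prod.fst).Nodup) :
    search_in word_embeds oov_entities = pvRef word_embeds oov_entities := by
  rw [search_in_eq_fold]
  have hstep : ∀ (d : PySem.Dict String String) (p : String × String),
      pvStepA word_embeds d p =
        match ((pvCandidates p.2).find? (fun c => word_embeds.contains c)) with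
        | some c => d.insert p.1 c
        | none => d := pvStepA_eq word_embeds
  rw [show (pvStepA word_embeds) =
      (fun d p =>
        match ((pvCandidates p.2).find? (fun c => word_embeds.contains c)) with
        | some v => d.insert p.1 v
        | none => d) from funext fun d => funext fun p => hstep d p]
  rw [pvFold_items _ _ _ (fun q _ => PySem.Dict.contains_empty q.1) hnd]
  simp [pvRef, PySem.Dict.empty]

-- ---- B's staged passes ----

-- the insert-only part of one pass
def pvIns (embeds : List String) (f : String → String)
    (d : PySem.Dict String String) (p : String × String) : PySem.Dict String String :=
  if embeds.contains (f p.2) then d.insert p.1 (f p.2) else d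

-- P1: a pass splits into insertions and the filtered remainder.
theorem pvPass_split (embeds : List String) (f : String → String)
    (l : List (String × String)) (d : PySem.Dict String String) (acc : List (String × String)) :
    (l.foldl (fun acc p =>
        let form := f p.2
        if embeds.contains form then (acc.1.insert p.1 form, acc.2)
        else (acc.1, acc.2 ++ [p])) (d, acc)) =
      (l.foldl (pvIns embeds f) d, acc ++ l.filter (fun p => !(embeds.contains (f p.2)))) := by
  induction l generalizing d acc with
  | nil => simp
  | cons p l ih =>
    by_cases h : embeds.contains (f p.2) = true
    · simp only [List.foldl_cons, List.filter_cons, h, if_true, Bool.not_true]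
      rw [ih]
      have h' : f p.2 ∈ embeds := by simpa [List.contains_eq_mem] using h
      simp [pvIns, List.contains_eq_mem, h']
    · simp only [List.foldl_cons, List.filter_cons, Bool.not_eq_true] at h ⊢
      simp only [h, Bool.not_false, if_true]
      rw [ih]
      have h' : f p.2 ∉ embeds := by simpa [List.contains_eq_mem] using h
      simp [pvIns, List.contains_eq_mem, h', List.append_assoc]

-- P2a: a key outside l is untouched by the insert fold.
theorem pvIns_get?_of_not_mem (embeds : List String) (f : String → String)
    (l : List (String × String)) (d : PySem.Dict String String) (k : String)
    (hk : k ∉ l.map Prod.fst) :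
    (l.foldl (pvIns embeds f) d).get? k = d.get? k := by
  induction l generalizing d with
  | nil => rfl
  | cons p l ih =>
    simp only [List.map_cons, List.mem_cons, not_or] at hk
    simp only [List.foldl_cons]
    rw [ih _ hk.2]
    by_cases h : (f p.2) ∈ embeds <;>
      simp [pvIns, List.contains_eq_mem, h, PySem.Dict.get?_insert_of_ne _ _ hk.1]

-- P2b: lookup of a member's key after the insert fold.
theorem pvIns_get?_mem (embeds : List String) (f : String → String)
    (l : List (String × String)) (d : PySem.Dict String String)
    (hnd : (l.map Prod.fst).Nodup) (p : String × String) (hp : p ∈ l) :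
    (l.foldl (pvIns embeds f) d).get? p.1 =
      if embeds.contains (f p.2) then some (f p.2) else d.get? p.1 := by
  induction l generalizing d with
  | nil => cases hp
  | cons q l ih =>
    simp only [List.map_cons, List.nodup_cons, List.mem_map] at hnd
    simp only [List.foldl_cons]
    rcases List.mem_cons.mp hp with rfl | hp'
    · rw [pvIns_get?_of_not_mem _ _ _ _ _ (by
        intro hmem
        rcases List.mem_map.mp hmem with ⟨q, hq, hqe⟩
        exact hnd.1 ⟨q, hq, hqe⟩)]
      by_cases h : (f p.2) ∈ embeds <;>
        simp [pvIns, List.contains_eq_mem, h, PySem.Dict.get?_insert_self]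
    · rw [ih _ hnd.2 hp']
      have hne : p.1 ≠ q.1 := fun he => hnd.1 ⟨p, hp', he⟩
      by_cases h : (f p.2) ∈ embeds
      · simp [List.contains_eq_mem, h]
      · have hgq : (pvIns embeds f d q).get? p.1 = d.get? p.1 := by
          by_cases hq2 : (f q.2) ∈ embeds <;>
            simp [pvIns, List.contains_eq_mem, hq2, PySem.Dict.get?_insert_of_ne _ _ hne]
        simp [List.contains_eq_mem, h, hgq]

-- P4: keys outside the remaining list are untouched by any number of stages.
theorem pvStages_get?_of_not_mem (embeds : List String) (forms : List (String → String))
    (d : PySem.Dict String String) (r : List (String × String)) (k : String)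
    (hk : k ∉ r.map Prod.fst) :
    ((forms.foldl (pvPassB embeds) (d, r)).1).get? k = d.get? k := by
  induction forms generalizing d r with
  | nil => rfl
  | cons f forms ih =>
    simp only [List.foldl_cons]
    rw [show pvPassB embeds (d, r) f =
        (r.foldl (pvIns embeds f) d, [] ++ r.filter (fun p => !(embeds.contains (f p.2)))) from
      pvPass_split embeds f r d []]
    rw [ih _ _ (by
      intro hmem
      rcases List.mem_map.mp hmem with ⟨q, hq, hqe⟩
      have hq' : q ∈ r ∧ ¬((f q.2) ∈ embeds) := by simpa using hq
      exact hk (List.mem_map.mpr ⟨q, hq'.1, hqe⟩))]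
    exact pvIns_get?_of_not_mem embeds f r d k hk

-- P5: after all stages, a member's key maps to its first matching form.
theorem pvStages_get?_mem (embeds : List String) (forms : List (String → String))
    (d : PySem.Dict String String) (r : List (String × String))
    (hnd : (r.map Prod.fst).Nodup)
    (hfresh : ∀ q ∈ r, d.get? q.1 = none)
    (p : String × String) (hp : p ∈ r) :
    ((forms.foldl (pvPassB embeds) (d, r)).1).get? p.1 =
      (forms.map (fun f => f p.2)).find? (fun c => embeds.contains c) := by
  induction forms generalizing d r with
  | nil => simpa using hfresh p hp
  | cons f forms ih =>
    simp only [List.foldl_cons, List.map_cons]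
    rw [show pvPassB embeds (d, r) f =
        (r.foldl (pvIns embeds f) d, [] ++ r.filter (fun p => !(embeds.contains (f p.2)))) from
      pvPass_split embeds f r d []]
    simp only [List.nil_append]
    set r₁ := r.filter (fun p => !(embeds.contains (f p.2))) with hr₁
    set d₁ := r.foldl (pvIns embeds f) d with hd₁
    have hnd₁ : (r₁.map Prod.fst).Nodup := hnd.sublist (List.filter_sublist.map Prod.fst)
    have hfresh₁ : ∀ q ∈ r₁, d₁.get? q.1 = none := by
      intro q hq
      have hq' : q ∈ r ∧ ¬((f q.2) ∈ embeds) := by simpa [hr₁] using hq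
      rw [hd₁, pvIns_get?_mem embeds f r d hnd q hq'.1]
      rw [if_neg (by simp [List.contains_eq_mem, hq'.2])]
      exact hfresh q hq'.1
    by_cases h : (f p.2) ∈ embeds
    · -- matched now; p's key is absent from r₁, so later stages keep it
      rw [pvStages_get?_of_not_mem embeds forms d₁ r₁ p.1 (by
        intro hmem
        rcases List.mem_map.mp hmem with ⟨q, hq, hqe⟩
        have hq' : q ∈ r ∧ ¬((f q.2) ∈ embeds) := by simpa [hr₁] using hq
        have hqp : q = p := List.inj_on_of_nodup_map hnd hq'.1 hp hqe
        subst hqp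
        exact hq'.2 h)]
      rw [hd₁, pvIns_get?_mem embeds f r d hnd p hp,
        if_pos (by simp [List.contains_eq_mem, h])]
      simp [List.contains_eq_mem, h]
    · rw [ih d₁ r₁ hnd₁ hfresh₁
        (by simp [hr₁, List.mem_filter, hp, List.contains_eq_mem, h])]
      simp [List.contains_eq_mem, h]

theorem pvB_eq_ref (word_embeds : List String) (oov_entities : List (String × String))
    (hnd : (oov_entities.map Prod.fst).Nodup) :
    search_in_alt word_embeds oov_entities = pvRef word_embeds oov_entities := by
  unfold search_in_alt
  set embeds := PySem.Set.ofList word_embeds with hemb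
  set st := pvTransforms.foldl (pvPassB embeds) (PySem.Dict.empty, oov_entities) with hst
  rw [pvFold_items (fun p => st.1.get? p.1) oov_entities PySem.Dict.empty
      (fun q _ => PySem.Dict.contains_empty q.1) hnd]
  have hitems : (PySem.Dict.empty : PySem.Dict String String).items = [] := rfl
  rw [hitems, List.nil_append]
  unfold pvRef
  apply List.filterMap_congr
  intro p hp
  rw [hst, pvStages_get?_mem embeds pvTransforms PySem.Dict.empty oov_entities hnd
      (fun q _ => PySem.Dict.get?_empty q.1) p hp]
  have hm : pvTransforms.map (fun f => f p.2) = pvCandidates p.2 := rfl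
  rw [hm]
  simp [hemb, List.contains_eq_mem, PySem.Set.mem_ofList]

-- ===== VERDICT (by name: the statement is the Claim_ definition above) =====
theorem search_in_spec : Claim_equal_search_in := by
  intro word_embeds oov_entities _hdom hpre
  unfold Spec_search_in
  rw [pvA_eq_ref _ _ hpre, pvB_eq_ref _ _ hpre]
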